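-- pv_equiv track=rewrite | github.com/dropmeteamwork/GUI-Drop-Me- | src/gui/mcu.py | get_command_name
-- ===== SOURCE A (Python) =====
-- from enum import IntEnum
--
-- class SystemControl(IntEnum):
--     PING = 0x01
--     GET_MCU_STATUS = 0x02
--     SYSTEM_RESET = 0x03
--
--     SYS_PING = PING
--     SYS_RESET = SYSTEM_RESET
--
-- class ReadCommand(IntEnum):
--     READ_SENSOR = 0x11
--     POLL_WEIGHT = 0x12
--
-- class DeviceControl(IntEnum):
--     RING_LIGHT = 0x50
--     BUZZER_BEEP = 0x51
--
-- class SessionControl(IntEnum):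
--     REQUEST_SEQUENCE_STATUS = 0x60
--     START_SESSION = 0x61
--     ACCEPT_ITEM = 0x62
--     REJECT_ITEM = 0x63
--     END_SESSION = 0x64
--
-- class MaintenanceDoorControl(IntEnum):
--     OPEN_DOOR_1 = 0x65
--     OPEN_DOOR_2 = 0x66
--     OPEN_DOOR_3 = 0x67
--
-- class AsyncEvent(IntEnum):
--     STATUS_OK = 0x70
--     ITEM_PLACED = 0x71
--     ITEM_DROPPED = 0x72
--     BASKET_STATUS = 0x73
--
-- class ResponseCode(IntEnum):
--     ACK = 0xA0
--     NACK = 0xA1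
--     DATA = 0xA2
--     ERROR = 0xA3
--
-- def get_command_name(cmd: int) -> str:
--     for enum_class in [
--         SystemControl,
--         ReadCommand,
--         DeviceControl,
--         SessionControl,
--         MaintenanceDoorControl,
--         AsyncEvent,
--         ResponseCode,
--     ]:
--         try:
--             return enum_class(cmd).name
--         except ValueError:
--             continue
--     return f"UNKNOWN_0x{int(cmd):02X}"
-- ===== SOURCE B (Python) =====
-- from bisect import bisect_right
--
-- # Contiguous command-code blocks, sorted by starting value; a name is found by
-- # binary-searching for the block whose range contains cmd and indexing by offset.
-- _BLOCK_STARTS = [0x01, 0x11, 0x50, 0x60, 0x70, 0xA0]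
-- _BLOCK_NAMES = [
--     ["PING", "GET_MCU_STATUS", "SYSTEM_RESET"],
--     ["READ_SENSOR", "POLL_WEIGHT"],
--     ["RING_LIGHT", "BUZZER_BEEP"],
--     ["REQUEST_SEQUENCE_STATUS", "START_SESSION", "ACCEPT_ITEM", "REJECT_ITEM",
--      "END_SESSION", "OPEN_DOOR_1", "OPEN_DOOR_2", "OPEN_DOOR_3"],
--     ["STATUS_OK", "ITEM_PLACED", "ITEM_DROPPED", "BASKET_STATUS"],
--     ["ACK", "NACK", "DATA", "ERROR"],
-- ]
--
-- def get_command_name(cmd: int) -> str: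
--     i = bisect_right(_BLOCK_STARTS, cmd) - 1
--     if i >= 0:
--         names = _BLOCK_NAMES[i]
--         off = cmd - _BLOCK_STARTS[i]
--         if off < len(names):
--             return names[off]
--     return f"UNKNOWN_0x{int(cmd):02X}"
-- ===== Notes on version B (the rewrite author's own statement) =====
-- stated objective: alternative
-- what changed: Replaces the seven per-class try/except enum-construction attempts with an interval table of contiguous code blocks (merging the adjacent SessionControl/MaintenanceDoorControl ranges into one block): a binary search (bisect_right) over the block start values finds the candidate block and the name is obtained by offset indexing into its name list.
import Mathlib
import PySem

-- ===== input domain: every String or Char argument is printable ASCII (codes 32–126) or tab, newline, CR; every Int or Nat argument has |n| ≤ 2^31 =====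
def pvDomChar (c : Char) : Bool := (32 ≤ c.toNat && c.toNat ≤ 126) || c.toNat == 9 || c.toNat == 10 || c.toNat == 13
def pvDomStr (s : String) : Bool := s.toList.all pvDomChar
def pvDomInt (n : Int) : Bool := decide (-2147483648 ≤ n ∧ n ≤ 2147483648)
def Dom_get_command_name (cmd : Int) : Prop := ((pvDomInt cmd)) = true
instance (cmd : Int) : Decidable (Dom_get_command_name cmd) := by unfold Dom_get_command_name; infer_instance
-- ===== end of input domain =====

-- B replaces A's seven try/except enum-construction attempts with an interval table of
-- contiguous code blocks: a binary search over the block starts, then offset indexing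
-- (objective: alternative).

-- Shared helper: the f-string fallback  f"UNKNOWN_0x{int(cmd):02X}"  (format(n,'02X'):
-- upper-case hex digits, '-' sign first, zero-padded to total width 2 including the sign).
def hexDigit (n : Nat) : Char := if n < 10 then Char.ofNat (48 + n) else Char.ofNat (55 + n)

def hexChars (n : Nat) : List Char :=
  if _h : n < 16 then [hexDigit n]
  else hexChars (n / 16) ++ [hexDigit (n % 16)]
  decreasing_by exact Nat.div_lt_self (by omega) (by omega)

def fmt02X (n : Int) : String :=
  if n < 0 then String.ofList ('-' :: hexChars n.natAbs)
  else String.ofList (if (hexChars n.natAbs).length < 2 then '0' :: hexChars n.natAbs else hexChars n.natAbs)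

-- ===== PORT A =====
-- each helper = 'enum_class(cmd).name' : some name when cmd is a member's value, none = ValueError
def systemControlName? (cmd : Int) : Option String :=
  if cmd = 0x01 then some "PING"
  else if cmd = 0x02 then some "GET_MCU_STATUS"
  else if cmd = 0x03 then some "SYSTEM_RESET"
  else none   -- SYS_PING / SYS_RESET are aliases: not distinct members

def readCommandName? (cmd : Int) : Option String :=
  if cmd = 0x11 then some "READ_SENSOR"
  else if cmd = 0x12 then some "POLL_WEIGHT"
  else none

def deviceControlName? (cmd : Int) : Option String :=
  if cmd = 0x50 then some "RING_LIGHT"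
  else if cmd = 0x51 then some "BUZZER_BEEP"
  else none

def sessionControlName? (cmd : Int) : Option String :=
  if cmd = 0x60 then some "REQUEST_SEQUENCE_STATUS"
  else if cmd = 0x61 then some "START_SESSION"
  else if cmd = 0x62 then some "ACCEPT_ITEM"
  else if cmd = 0x63 then some "REJECT_ITEM"
  else if cmd = 0x64 then some "END_SESSION"
  else none

def maintenanceDoorControlName? (cmd : Int) : Option String :=
  if cmd = 0x65 then some "OPEN_DOOR_1"
  else if cmd = 0x66 then some "OPEN_DOOR_2"
  else if cmd = 0x67 then some "OPEN_DOOR_3"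
  else none

def asyncEventName? (cmd : Int) : Option String :=
  if cmd = 0x70 then some "STATUS_OK"
  else if cmd = 0x71 then some "ITEM_PLACED"
  else if cmd = 0x72 then some "ITEM_DROPPED"
  else if cmd = 0x73 then some "BASKET_STATUS"
  else none

def responseCodeName? (cmd : Int) : Option String :=
  if cmd = 0xA0 then some "ACK"
  else if cmd = 0xA1 then some "NACK"
  else if cmd = 0xA2 then some "DATA"
  else if cmd = 0xA3 then some "ERROR"
  else none

-- the for-loop over the seven classes with early return, then the f-string fallback
def get_command_name (cmd : Int) : String :=
  match List.findSome? (fun f => f cmd)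
      [systemControlName?, readCommandName?, deviceControlName?, sessionControlName?,
       maintenanceDoorControlName?, asyncEventName?, responseCodeName?] with
  | some name => name
  | none => "UNKNOWN_0x" ++ fmt02X cmd

-- ===== PORT B =====
def blockStarts : List Int := [0x01, 0x11, 0x50, 0x60, 0x70, 0xA0]

def blockNames : List (List String) :=
  [["PING", "GET_MCU_STATUS", "SYSTEM_RESET"],
   ["READ_SENSOR", "POLL_WEIGHT"],
   ["RING_LIGHT", "BUZZER_BEEP"],
   ["REQUEST_SEQUENCE_STATUS", "START_SESSION", "ACCEPT_ITEM", "REJECT_ITEM",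
    "END_SESSION", "OPEN_DOOR_1", "OPEN_DOOR_2", "OPEN_DOOR_3"],
   ["STATUS_OK", "ITEM_PLACED", "ITEM_DROPPED", "BASKET_STATUS"],
   ["ACK", "NACK", "DATA", "ERROR"]]

-- bisect.bisect_right's lo/hi loop; the fuel argument (hi-lo iterations suffice, we pass
-- length+1) only makes the loop structurally total, the computation is Python's
def bisectLoop (a : List Int) (x : Int) : Nat → Nat → Nat → Nat
  | 0, lo, _ => lo
  | fuel+1, lo, hi =>
    if lo < hi then
      let mid := (lo + hi) / 2
      if x < a.getD mid 0 then bisectLoop a x fuel lo mid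
      else bisectLoop a x fuel (mid + 1) hi
    else lo

def bisectRight (a : List Int) (x : Int) : Nat := bisectLoop a x (a.length + 1) 0 a.length

def get_command_name_alt (cmd : Int) : String :=
  let i : Int := (bisectRight blockStarts cmd : Int) - 1
  if 0 ≤ i then
    let names := blockNames.getD i.toNat []
    let off := cmd - blockStarts.getD i.toNat 0
    if off < (names.length : Int) then
      -- names[off]: pyGet? is Python's indexing; the guard keeps it in range (getD "" unreached)
      (PySem.List.pyGet? names off).getD ""
    else "UNKNOWN_0x" ++ fmt02X cmd
  else "UNKNOWN_0x" ++ fmt02X cmd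

-- ===== PRECONDITION & SPEC =====
def Spec_get_command_name (cmd : Int) (out : String) : Prop := out = get_command_name_alt cmd
instance (cmd : Int) (out : String) : Decidable (Spec_get_command_name cmd out) := by unfold Spec_get_command_name; infer_instance

-- ===== CLAIM (what is proved, stated in full; the proofs are below) =====
def Claim_equal_get_command_name : Prop := ∀ (cmd : Int), Dom_get_command_name cmd → Spec_get_command_name cmd (get_command_name cmd)

-- ===== LEMMAS AND PROOFS =====

-- closed evaluation of the binary search on the fixed start table
theorem bisect_eval (cmd : Int) :
    bisectRight blockStarts cmd =
      if cmd < 1 then 0 else if cmd < 17 then 1 else if cmd < 80 then 2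
      else if cmd < 96 then 3 else if cmd < 112 then 4 else if cmd < 160 then 5 else 6 := by
  rcases lt_or_ge cmd 1 with h|h
  · simp [bisectRight, bisectLoop, blockStarts, h, show cmd < 17 by omega, show cmd < 96 by omega]
  rcases lt_or_ge cmd 17 with h2|h2
  · simp [bisectRight, bisectLoop, blockStarts, h2, show ¬ cmd < 1 by omega, show cmd < 96 by omega]
  rcases lt_or_ge cmd 80 with h3|h3
  · simp [bisectRight, bisectLoop, blockStarts, h3, show ¬ cmd < 1 by omega,
      show ¬ cmd < 17 by omega, show cmd < 96 by omega]
  rcases lt_or_ge cmd 96 with h4|h4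
  · simp [bisectRight, bisectLoop, blockStarts, h4, show ¬ cmd < 1 by omega,
      show ¬ cmd < 17 by omega, show ¬ cmd < 80 by omega]
  rcases lt_or_ge cmd 112 with h5|h5
  · simp [bisectRight, bisectLoop, blockStarts, h5, show ¬ cmd < 1 by omega,
      show ¬ cmd < 17 by omega, show ¬ cmd < 80 by omega, show ¬ cmd < 96 by omega,
      show cmd < 160 by omega]
  rcases lt_or_ge cmd 160 with h6|h6
  · simp [bisectRight, bisectLoop, blockStarts, h6, show ¬ cmd < 1 by omega,
      show ¬ cmd < 17 by omega, show ¬ cmd < 80 by omega, show ¬ cmd < 96 by omega,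
      show ¬ cmd < 112 by omega]
  · simp [bisectRight, bisectLoop, blockStarts, show ¬ cmd < 1 by omega,
      show ¬ cmd < 17 by omega, show ¬ cmd < 80 by omega, show ¬ cmd < 96 by omega,
      show ¬ cmd < 112 by omega, show ¬ cmd < 160 by omega]

theorem get_command_name_eq (cmd : Int) : get_command_name cmd = get_command_name_alt cmd := by
  by_cases h0 : cmd = 1
  · subst h0; decide
  by_cases h1 : cmd = 2
  · subst h1; decide
  by_cases h2 : cmd = 3
  · subst h2; decide
  by_cases h3 : cmd = 17
  · subst h3; decide
  by_cases h4 : cmd = 18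
  · subst h4; decide
  by_cases h5 : cmd = 80
  · subst h5; decide
  by_cases h6 : cmd = 81
  · subst h6; decide
  by_cases h7 : cmd = 96
  · subst h7; decide
  by_cases h8 : cmd = 97
  · subst h8; decide
  by_cases h9 : cmd = 98
  · subst h9; decide
  by_cases h10 : cmd = 99
  · subst h10; decide
  by_cases h11 : cmd = 100
  · subst h11; decide
  by_cases h12 : cmd = 101
  · subst h12; decide
  by_cases h13 : cmd = 102
  · subst h13; decide
  by_cases h14 : cmd = 103
  · subst h14; decide
  by_cases h15 : cmd = 112
  · subst h15; decide
  by_cases h16 : cmd = 113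
  · subst h16; decide
  by_cases h17 : cmd = 114
  · subst h17; decide
  by_cases h18 : cmd = 115
  · subst h18; decide
  by_cases h19 : cmd = 160
  · subst h19; decide
  by_cases h20 : cmd = 161
  · subst h20; decide
  by_cases h21 : cmd = 162
  · subst h21; decide
  by_cases h22 : cmd = 163
  · subst h22; decide
  -- fallback: neither program finds a name
  have hA : get_command_name cmd = "UNKNOWN_0x" ++ fmt02X cmd := by
    simp only [get_command_name, systemControlName?, readCommandName?, deviceControlName?,
      sessionControlName?, maintenanceDoorControlName?, asyncEventName?, responseCodeName?,
      List.findSome?]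
    simp [h0, h1, h2, h3, h4, h5, h6, h7, h8, h9, h10, h11, h12, h13, h14, h15, h16,
      h17, h18, h19, h20, h21, h22]
  have hB : get_command_name_alt cmd = "UNKNOWN_0x" ++ fmt02X cmd := by
    simp only [get_command_name_alt, bisect_eval]
    split_ifs <;> simp_all [blockStarts, blockNames] <;> omega
  rw [hA, hB]

-- ===== VERDICT (by name: the statement is the Claim_ definition above) =====
theorem get_command_name_spec : Claim_equal_get_command_name := by
  intro cmd _
  unfold Spec_get_command_name
  exact get_command_name_eq cmd
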